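-- pv_equiv track=rewrite | github.com/lavf/pseudocode | ermittlePruefziffer_31032022/pseudocode31032022.py | sucheTopseller
-- ===== SOURCE A (Python) =====
-- def sucheTopseller(kriterium, vorgabewert, absatz):
--     i = 0
--     absatzStk = 0
--     pruefziffer = ""
--
--     while i < len(absatz):
--         if absatz[i][kriterium] == vorgabewert:
--             if absatz[i][4] > absatzStk:
--                 absatzStk = absatz[i][4]
--                 pruefziffer = str(absatz[i][0]) + str(absatz[i][1]) + str(absatz[i][2]) + str(absatz[i][3])
--
--         i = i + 1
--
--     if pruefziffer == "":
--          pruefziffer = "Das Kriterium {:0} mit Vorgabewert {:1} hatte keinen Absatz".format(kriterium, vorgabewert)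
--
--     return pruefziffer
-- ===== SOURCE B (Python) =====
-- def sucheTopseller(kriterium, vorgabewert, absatz):
--     matches = [r for r in absatz if r[kriterium] == vorgabewert and r[4] > 0]
--     if not matches:
--         return "Das Kriterium {:0} mit Vorgabewert {:1} hatte keinen Absatz".format(kriterium, vorgabewert)
--     best = max(matches, key=lambda r: r[4])
--     return str(best[0]) + str(best[1]) + str(best[2]) + str(best[3])
-- ===== Notes on version B (the rewrite author's own statement) =====
-- stated objective: simpler
-- what changed: Replaces the indexed while-loop that threads a running (best-sales, code-string) pair with a filter of the positive-sales matching records followed by a single max(key=sales) (first maximal element), building the code string only once at the end.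
import Mathlib
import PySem

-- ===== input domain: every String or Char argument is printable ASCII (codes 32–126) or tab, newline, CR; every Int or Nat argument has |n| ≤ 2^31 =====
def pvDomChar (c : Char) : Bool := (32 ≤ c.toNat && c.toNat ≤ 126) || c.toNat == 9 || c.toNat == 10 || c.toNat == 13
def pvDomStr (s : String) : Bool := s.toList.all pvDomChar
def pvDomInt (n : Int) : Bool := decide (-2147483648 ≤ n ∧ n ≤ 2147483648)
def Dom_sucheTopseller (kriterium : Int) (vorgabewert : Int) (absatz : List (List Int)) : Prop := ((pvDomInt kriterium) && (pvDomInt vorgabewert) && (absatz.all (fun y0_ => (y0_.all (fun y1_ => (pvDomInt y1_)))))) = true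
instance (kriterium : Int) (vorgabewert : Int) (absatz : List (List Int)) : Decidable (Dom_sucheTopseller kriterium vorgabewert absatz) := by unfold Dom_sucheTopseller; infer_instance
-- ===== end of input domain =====

-- B replaces A's indexed while-loop threading a running (best-sales, code-string) pair by
-- filter-then-max(key=sales), building the code string once at the end (objective: simpler).

-- shared rendering helpers (pure string formatting, used verbatim by both Pythons)
-- str(r[0])+str(r[1])+str(r[2])+str(r[3])
def pvCode4 (r : List Int) : String :=
  String.ofList (PySem.Int.toChars (PySem.List.pyGetD r 0 0) ++ PySem.Int.toChars (PySem.List.pyGetD r 1 0)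
    ++ PySem.Int.toChars (PySem.List.pyGetD r 2 0) ++ PySem.Int.toChars (PySem.List.pyGetD r 3 0))

-- "Das Kriterium {:0} mit Vorgabewert {:1} hatte keinen Absatz".format(k, v)
def pvErr (k v : Int) : String :=
  String.ofList ("Das Kriterium ".toList ++ PySem.Int.toChars k
    ++ " mit Vorgabewert ".toList ++ PySem.Int.toChars v ++ " hatte keinen Absatz".toList)

-- ===== PORT A =====
-- the while-loop over i, state (absatzStk, pruefziffer), as a left fold over absatz
def sucheTopseller (kriterium : Int) (vorgabewert : Int) (absatz : List (List Int)) : String :=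
  let st := absatz.foldl (fun (s : Int × String) r =>
    if PySem.List.pyGetD r kriterium 0 = vorgabewert then
      if s.1 < PySem.List.pyGetD r 4 0 then (PySem.List.pyGetD r 4 0, pvCode4 r) else s
    else s) (0, "")
  if st.2 = "" then pvErr kriterium vorgabewert else st.2

-- ===== PORT B =====
def sucheTopseller_alt (kriterium : Int) (vorgabewert : Int) (absatz : List (List Int)) : String :=
  let matchRecs := absatz.filter (fun r =>
    decide (PySem.List.pyGetD r kriterium 0 = vorgabewert ∧ 0 < PySem.List.pyGetD r 4 0))
  match PySem.List.max? matchRecs (fun r => PySem.List.pyGetD r 4 0) with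
  | some best => pvCode4 best
  | none => pvErr kriterium vorgabewert

-- ===== PRECONDITION & SPEC =====
-- Pre_ excludes exactly the IndexError inputs: every row must admit index kriterium, and a row
-- that matches the Vorgabewert must have length ≥ 5 (its r[4] is read).
def Pre_sucheTopseller (kriterium : Int) (vorgabewert : Int) (absatz : List (List Int)) : Prop :=
  ∀ r ∈ absatz, PySem.Raise.InRange r.length kriterium ∧
    (PySem.List.pyGetD r kriterium 0 = vorgabewert → 5 ≤ r.length)
instance (kriterium : Int) (vorgabewert : Int) (absatz : List (List Int)) : Decidable (Pre_sucheTopseller kriterium vorgabewert absatz) := by unfold Pre_sucheTopseller; infer_instance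
def pvWitness_sucheTopseller : Int × Int × List (List Int) := (0, 5, [[1, 2, 3, 4, 0], [5, 2, 3, 4, 7], [5, 9, 9, 9, 7]])

def Spec_sucheTopseller (kriterium : Int) (vorgabewert : Int) (absatz : List (List Int)) (out : String) : Prop := out = sucheTopseller_alt kriterium vorgabewert absatz
instance (kriterium : Int) (vorgabewert : Int) (absatz : List (List Int)) (out : String) : Decidable (Spec_sucheTopseller kriterium vorgabewert absatz out) := by unfold Spec_sucheTopseller; infer_instance

-- ===== CLAIM (what is proved, stated in full; the proofs are below) =====
def Claim_equal_sucheTopseller : Prop := ∀ (kriterium : Int) (vorgabewert : Int) (absatz : List (List Int)), Dom_sucheTopseller kriterium vorgabewert absatz → Pre_sucheTopseller kriterium vorgabewert absatz → Spec_sucheTopseller kriterium vorgabewert absatz (sucheTopseller kriterium vorgabewert absatz)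

-- ===== LEMMAS AND PROOFS =====

-- representation of B's Option-accumulator as A's (absatzStk, pruefziffer) pair
def pvRepr : Option (List Int) → Int × String
  | none => (0, "")
  | some m => (PySem.List.pyGetD m 4 0, pvCode4 m)

lemma pvToDigitsCore_ne_nil (b f n : Nat) (l : List Char) : Nat.toDigitsCore b (f+1) n l ≠ [] := by
  simp only [Nat.toDigitsCore]
  split
  · simp
  · intro h
    have h2 := Nat.toDigitsCore_lens_eq b f (n / b) ((n % b).digitChar) l
    rw [h] at h2
    simp at h2

lemma pvToChars_ne_nil (n : Int) : PySem.Int.toChars n ≠ [] := by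
  unfold PySem.Int.toChars
  split
  · simp
  · exact pvToDigitsCore_ne_nil 10 _ n.toNat []

lemma pvCode4_ne_empty (r : List Int) : pvCode4 r ≠ "" := by
  intro h
  have h2 := congrArg String.toList h
  rw [pvCode4, String.toList_ofList] at h2
  simp at h2
  exact pvToChars_ne_nil _ h2.1

-- A's fold, started at a represented accumulator whose key is positive, computes the
-- representation of B's max?-fold over the filtered list.
lemma pvLoop_eq (k v : Int) (l : List (List Int)) (acc : Option (List Int))
    (h : ∀ m, acc = some m → 0 < PySem.List.pyGetD m 4 0) :
    l.foldl (fun (s : Int × String) r =>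
      if PySem.List.pyGetD r k 0 = v then
        if s.1 < PySem.List.pyGetD r 4 0 then (PySem.List.pyGetD r 4 0, pvCode4 r) else s
      else s) (pvRepr acc)
    = pvRepr ((l.filter (fun r =>
        decide (PySem.List.pyGetD r k 0 = v ∧ 0 < PySem.List.pyGetD r 4 0))).foldl
        (fun acc x =>
          match acc with
          | none => some x
          | some m => if PySem.List.pyGetD m 4 0 < PySem.List.pyGetD x 4 0 then some x else some m)
        acc) := by
  induction l generalizing acc with
  | nil => rfl
  | cons r rest ih =>
    simp only [List.foldl_cons, List.filter_cons]
    by_cases hm : PySem.List.pyGetD r k 0 = v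
    · by_cases hk : 0 < PySem.List.pyGetD r 4 0
      · -- r passes the filter
        simp only [hm, hk, and_self, if_pos, decide_true, List.foldl_cons]
        cases acc with
        | none =>
          have : pvRepr none = (0, "") := rfl
          rw [this]
          simp only [if_pos hk]
          have hstep : ((PySem.List.pyGetD r 4 0 : Int), pvCode4 r) = pvRepr (some r) := rfl
          rw [hstep, ih (some r) (by intro m hm'; cases hm'; exact hk)]
        | some m =>
          have hrep : pvRepr (some m) = (PySem.List.pyGetD m 4 0, pvCode4 m) := rfl
          rw [hrep]
          by_cases hlt : PySem.List.pyGetD m 4 0 < PySem.List.pyGetD r 4 0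
          · simp only [if_pos hlt]
            have hstep : ((PySem.List.pyGetD r 4 0 : Int), pvCode4 r) = pvRepr (some r) := rfl
            rw [hstep, ih (some r) (by intro m' hm'; cases hm'; exact hk)]
          · simp only [if_neg hlt]
            rw [show ((PySem.List.pyGetD m 4 0 : Int), pvCode4 m) = pvRepr (some m) from rfl]
            exact ih (some m) h
      · -- r matches but has non-positive sales: A never updates (key ≤ 0 ≤ absatzStk)
        have hfilt : decide (PySem.List.pyGetD r k 0 = v ∧ 0 < PySem.List.pyGetD r 4 0) = false := by
          simp [hm, hk]
        rw [hfilt]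
        simp only [Bool.false_eq_true, if_false, if_pos hm]
        have hno : ¬ (pvRepr acc).1 < PySem.List.pyGetD r 4 0 := by
          cases acc with
          | none => simpa using hk
          | some m =>
            have := h m rfl
            simp only [pvRepr]
            omega
        rw [if_neg hno]
        exact ih acc h
    · -- r does not match the criterion
      have hfilt : decide (PySem.List.pyGetD r k 0 = v ∧ 0 < PySem.List.pyGetD r 4 0) = false := by
        simp [hm]
      rw [hfilt]
      simp only [Bool.false_eq_true, if_false, if_neg hm]
      exact ih acc h

-- ===== VERDICT (by name: the statement is the Claim_ definition above) =====
theorem sucheTopseller_spec : Claim_equal_sucheTopseller := by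
  intro k v absatz _ _
  unfold Spec_sucheTopseller sucheTopseller sucheTopseller_alt
  have hmax : PySem.List.max? (absatz.filter (fun r =>
      decide (PySem.List.pyGetD r k 0 = v ∧ 0 < PySem.List.pyGetD r 4 0)))
      (fun r => PySem.List.pyGetD r 4 0)
    = (absatz.filter (fun r =>
        decide (PySem.List.pyGetD r k 0 = v ∧ 0 < PySem.List.pyGetD r 4 0))).foldl
        (fun acc x =>
          match acc with
          | none => some x
          | some m => if PySem.List.pyGetD m 4 0 < PySem.List.pyGetD x 4 0 then some x else some m)
        none := by
    unfold PySem.List.max?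
    congr 1
    funext acc x
    cases acc <;> rfl
  have hloop := pvLoop_eq k v absatz none (by intro m hm; cases hm)
  cases hres : (absatz.filter (fun r =>
      decide (PySem.List.pyGetD r k 0 = v ∧ 0 < PySem.List.pyGetD r 4 0))).foldl
      (fun acc x =>
        match acc with
        | none => some x
        | some m => if PySem.List.pyGetD m 4 0 < PySem.List.pyGetD x 4 0 then some x else some m)
      none with
  | none =>
    rw [hres] at hloop
    simp only [pvRepr] at hloop
    simp only [hmax, hres, hloop]
    simp
  | some m =>
    rw [hres] at hloop
    simp only [pvRepr] at hloop
    simp only [hmax, hres, hloop]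
    simp [pvCode4_ne_empty m]
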